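-- pv_equiv track=rewrite | github.com/delaanthonio/hackerrank | algorithms/dp/kmarsh/kmarsh.py | prefixes
-- ===== SOURCE A (Python) =====
-- from typing import List
--
-- def prefixes(row: str) -> List[int]:
--     new_row = [-1]
--     for i, x in enumerate(row):
--         if x == '.':
--             new_row.append(new_row[i] + 1)
--         else:
--             new_row.append(-1)
--     return tuple(new_row[1:])
-- ===== SOURCE B (Python) =====
-- def prefixes(row):
--     # Run-based pass: for each maximal run of equal characters, emit
--     # 0..n-1 if it is a dot run, else -1 repeated n times.
--     out = []
--     i = 0
--     n = len(row)
--     while i < n: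
--         j = i
--         while j < n and row[j] == row[i]:
--             j += 1
--         if row[i] == '.':
--             out.extend(range(j - i))
--         else:
--             out.extend([-1] * (j - i))
--         i = j
--     return tuple(out)
-- ===== Notes on version B (the rewrite author's own statement) =====
-- stated objective: alternative
-- what changed: Replaces A's per-position recurrence that appends to a growing list and reads back its previous entry with a run-based scan over maximal runs of equal characters, emitting range(n) for a dot run and n copies of -1 otherwise.
import Mathlib
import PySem

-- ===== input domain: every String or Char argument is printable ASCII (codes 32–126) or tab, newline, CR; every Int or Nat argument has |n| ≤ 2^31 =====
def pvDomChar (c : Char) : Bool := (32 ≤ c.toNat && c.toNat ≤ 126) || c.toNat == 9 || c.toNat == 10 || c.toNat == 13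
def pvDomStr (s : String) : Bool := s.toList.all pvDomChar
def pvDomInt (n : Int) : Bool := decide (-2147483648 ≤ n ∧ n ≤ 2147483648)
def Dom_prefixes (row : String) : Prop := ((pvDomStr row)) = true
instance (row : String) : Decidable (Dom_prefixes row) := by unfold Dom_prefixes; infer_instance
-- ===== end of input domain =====

-- B replaces A's per-position recurrence (reading back the previous list entry)
-- with a run-based scan over maximal runs of equal characters; same O(n) cost.

-- ===== PORT A =====
-- new_row[i] is always in range (new_row holds i+1 elements at step i), so pyGetD is exact here.
def prefixes (row : String) : List Int :=
  PySem.List.slice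
    ((PySem.List.enumerate row.toList 0).foldl
      (fun nr p =>
        if p.2 = '.' then nr ++ [PySem.List.pyGetD nr p.1 0 + 1]
        else nr ++ [-1])
      [-1])
    (some 1) none

-- ===== PORT B =====
-- the inner while loop scanning one maximal run is takeWhile/dropWhile
def prefixes_altGo : List Char → List Int
  | [] => []
  | x :: xs =>
    let n := ((x :: xs).takeWhile (fun c => c == x)).length
    let rest := (x :: xs).dropWhile (fun c => c == x)
    (if x = '.' then (List.range n).map (Int.ofNat) else List.replicate n (-1))
      ++ prefixes_altGo rest
  termination_by l => l.length
  decreasing_by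
    rw [List.dropWhile_cons_of_pos (by simp)]
    exact Nat.lt_succ_of_le (List.length_dropWhile_le _ _)

def prefixes_alt (row : String) : List Int := prefixes_altGo row.toList

-- ===== PRECONDITION & SPEC =====
def Spec_prefixes (row : String) (out : List Int) : Prop := out = prefixes_alt row
instance (row : String) (out : List Int) : Decidable (Spec_prefixes row out) := by unfold Spec_prefixes; infer_instance

-- ===== CLAIM (what is proved, stated in full; the proofs are below) =====
def Claim_equal_prefixes : Prop := ∀ (row : String), Dom_prefixes row → Spec_prefixes row (prefixes row)

-- ===== LEMMAS AND PROOFS =====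

-- the recurrence both programs compute: each position's value from the previous one
def pvG (prev : Int) : List Char → List Int
  | [] => []
  | x :: xs =>
    (if x = '.' then prev + 1 else -1) :: pvG (if x = '.' then prev + 1 else -1) xs

theorem pvG_loopA (xs : List Char) : ∀ (s : Nat) (nr : List Int) (h : nr ≠ []),
    nr.length = s + 1 →
    (PySem.List.enumerate xs (s : Int)).foldl
      (fun nr p =>
        if p.2 = '.' then nr ++ [PySem.List.pyGetD nr p.1 0 + 1]
        else nr ++ [-1]) nr
    = nr ++ pvG (nr.getLast h) xs := by
  induction xs with
  | nil => intro s nr h hl; simp [PySem.List.enumerate_nil, pvG]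
  | cons x xs ih =>
    intro s nr h hl
    rw [PySem.List.enumerate_cons, List.foldl_cons]
    have hget : PySem.List.pyGetD nr (s : Int) 0 = nr.getLast h := by
      rw [PySem.List.pyGetD_natCast, List.getLast_eq_getElem,
        List.getD_eq_getElem?_getD, List.getElem?_eq_getElem (by omega)]
      simp [hl]
    have hcast : ((s : Int) + 1) = ((s + 1 : Nat) : Int) := by push_cast; ring
    by_cases hx : x = '.'
    · simp only [hx, if_true]
      rw [hget, hcast,
        ih (s + 1) (nr ++ [nr.getLast h + 1]) (by simp) (by simp [hl])]
      simp [pvG]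
    · simp only [if_neg hx]
      rw [hcast, ih (s + 1) (nr ++ [-1]) (by simp) (by simp [hl])]
      simp [pvG, hx]

theorem prefixes_eq_pvG (row : String) : prefixes row = pvG (-1) row.toList := by
  have h := pvG_loopA row.toList 0 [-1] (by simp) (by simp)
  simp only [Nat.cast_zero] at h
  unfold prefixes
  rw [h]
  simp [PySem.List.slice_from_one]

-- a dot run: values count up from prev+1
theorem pvG_replicate_dot (n : Nat) : ∀ (prev : Int) (rest : List Char),
    pvG prev (List.replicate n '.' ++ rest)
    = (List.range n).map (fun k => prev + 1 + Int.ofNat k) ++ pvG (prev + Int.ofNat n) rest := by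
  induction n with
  | zero => intro prev rest; simp [Int.ofNat_eq_natCast]
  | succ n ih =>
    intro prev rest
    rw [List.replicate_succ, List.cons_append]
    simp only [pvG, if_true]
    rw [ih (prev + 1) rest, List.range_succ_eq_map]
    simp only [List.map_cons, List.map_map, List.cons_append]
    congr 1
    · simp [Int.ofNat_eq_natCast]
    congr 1
    · apply List.map_congr_left; intro k _
      simp [Function.comp, Int.ofNat_eq_natCast, Nat.succ_eq_add_one]; ring
    · congr 1; simp [Int.ofNat_eq_natCast]; ring

-- a run of non-dot characters: n copies of -1, and the carried value resets to -1
theorem pvG_run_ne (run : List Char) (hne : run ≠ []) (hnd : ∀ c ∈ run, c ≠ '.') :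
    ∀ (prev : Int) (rest : List Char),
    pvG prev (run ++ rest) = List.replicate run.length (-1) ++ pvG (-1) rest := by
  induction run with
  | nil => exact absurd rfl hne
  | cons c run ih =>
    intro prev rest
    have hc : c ≠ '.' := hnd c (by simp)
    rw [List.cons_append]
    simp only [pvG, if_neg hc]
    rcases run with _ | ⟨d, run'⟩
    · simp
    · rw [ih (by simp) (fun x hx => hnd x (List.mem_cons_of_mem _ hx)) (-1) rest]
      simp [List.replicate_succ]

-- after a maximal run the head of the remainder is not '.', so the carried value is irrelevant
theorem pvG_reset (rest : List Char) (hr : ∀ c, rest.head? = some c → c ≠ '.')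
    (p q : Int) : pvG p rest = pvG q rest := by
  cases rest with
  | nil => rfl
  | cons y ys =>
    have hy : y ≠ '.' := hr y rfl
    simp only [pvG, if_neg hy]

theorem altGo_eq_pvG (l : List Char) : prefixes_altGo l = pvG (-1) l := by
  induction l using prefixes_altGo.induct with
  | case1 => simp [prefixes_altGo, pvG]
  | case2 x xs rest ih =>
    rw [prefixes_altGo]
    have hsplit : (x :: xs).takeWhile (fun c => c == x)
        ++ (x :: xs).dropWhile (fun c => c == x) = x :: xs :=
      List.takeWhile_append_dropWhile
    have htw : (x :: xs).takeWhile (fun c => c == x)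
        = List.replicate ((x :: xs).takeWhile (fun c => c == x)).length x := by
      apply List.eq_replicate_of_mem
      intro b hb
      simpa using List.mem_takeWhile_imp hb
    have hrest : ∀ c, ((x :: xs).dropWhile (fun c => c == x)).head? = some c → c ≠ x := by
      intro c hc
      have := List.head?_dropWhile_not (fun c => c == x) (x :: xs)
      rw [hc] at this
      simp at this
      exact this
    by_cases hx : x = '.'
    · rw [if_pos hx]
      have h1 : pvG (-1) (x :: xs)
          = pvG (-1) (List.replicate ((x :: xs).takeWhile (fun c => c == x)).length '.'
              ++ (x :: xs).dropWhile (fun c => c == x)) := by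
        conv_lhs => rw [← hsplit]
        rw [← hx]
        conv_lhs => rw [htw]
      rw [h1, pvG_replicate_dot, ih]
      congr 1
      · apply List.map_congr_left; intro k _; ring
      · apply pvG_reset
        intro c hc
        have := hrest c hc
        rw [hx] at this
        exact this
    · rw [if_neg hx]
      have hcons : (x :: xs).takeWhile (fun c => c == x)
          = x :: xs.takeWhile (fun c => c == x) :=
        List.takeWhile_cons_of_pos (by simp)
      have hn : ((x :: xs).takeWhile (fun c => c == x)).length ≠ 0 := by
        rw [hcons]; simp
      have h1 : pvG (-1) (x :: xs)
          = pvG (-1) (List.replicate ((x :: xs).takeWhile (fun c => c == x)).length x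
              ++ (x :: xs).dropWhile (fun c => c == x)) := by
        conv_lhs => rw [← hsplit]
        conv_lhs => rw [htw]
      rw [h1, pvG_run_ne _ (by simpa using hn)
        (by intro c hc; rw [List.eq_of_mem_replicate hc]; exact hx), ih]
      rw [List.length_replicate]

-- ===== VERDICT (by name: the statement is the Claim_ definition above) =====
theorem prefixes_spec : Claim_equal_prefixes := by
  intro row _
  unfold Spec_prefixes prefixes_alt
  rw [prefixes_eq_pvG, altGo_eq_pvG]
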